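-- pv_equiv track=rewrite | github.com/charlesnpx/keyframe | keyframe/dedupe.py | evidence_markers
-- ===== SOURCE A (Python) =====
-- STATUS_TOKENS = {
--     "approved",
--     "approve",
--     "complete",
--     "completed",
--     "confirmed",
--     "draft",
--     "pending",
--     "rejected",
--     "submitted",
-- }
--
-- def evidence_markers(tokens: set[str]) -> dict[str, set[str]]:
--     """Extract page/status/option markers used as conservative merge vetoes."""
--     page = {t for t in tokens if t == "page" or t.startswith("page")}
--     option = {t for t in tokens if t == "option" or t.startswith("option")}
--     section = {t for t in tokens if t == "section" or t.startswith("section")}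
--     status = tokens & STATUS_TOKENS
--     numeric_pages = set()
--     if "page" in tokens:
--         numeric_pages = {t for t in tokens if t.isdigit() or "/" in t}
--     return {
--         "page": page | numeric_pages,
--         "option": option,
--         "section": section,
--         "status": status,
--     }
-- ===== SOURCE B (Python) =====
-- STATUS_TOKENS = {
--     "approved",
--     "approve",
--     "complete",
--     "completed",
--     "confirmed",
--     "draft",
--     "pending",
--     "rejected",
--     "submitted",
-- }
--
-- def evidence_markers(tokens: set[str]) -> dict[str, set[str]]:
--     """Single classification pass instead of four separate scans."""
--     has_page = "page" in tokens
--     page, option, section, status, numeric = set(), set(), set(), set(), set()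
--     for t in tokens:
--         if t.startswith("page"):
--             page.add(t)
--         elif t.startswith("option"):
--             option.add(t)
--         elif t.startswith("section"):
--             section.add(t)
--         elif t in STATUS_TOKENS:
--             status.add(t)
--         if has_page and (t.isdigit() or "/" in t):
--             numeric.add(t)
--     return {
--         "page": page | numeric,
--         "option": option,
--         "section": section,
--         "status": status,
--     }
-- ===== Notes on version B (the rewrite author's own statement) =====
-- stated objective: alternative
-- what changed: Replaces A's four separate set comprehensions plus an intersection and a conditional fifth scan with one classification pass: a single loop over tokens dispatching each token into an accumulator set via an if/elif startswith chain (plus a numeric/slash check gated on a precomputed 'page' flag).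
import Mathlib
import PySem

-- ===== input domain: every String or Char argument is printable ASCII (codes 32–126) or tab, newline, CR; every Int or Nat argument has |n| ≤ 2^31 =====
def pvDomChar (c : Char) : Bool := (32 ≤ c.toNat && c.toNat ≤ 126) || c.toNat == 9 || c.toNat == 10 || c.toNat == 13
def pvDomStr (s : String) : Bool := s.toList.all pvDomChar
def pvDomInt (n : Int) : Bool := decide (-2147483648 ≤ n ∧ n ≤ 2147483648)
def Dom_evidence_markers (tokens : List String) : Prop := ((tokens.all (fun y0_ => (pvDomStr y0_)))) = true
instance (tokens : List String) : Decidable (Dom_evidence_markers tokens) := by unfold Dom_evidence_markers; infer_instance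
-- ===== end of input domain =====

-- B replaces A's four set comprehensions + intersection + conditional fifth scan by one classification pass (alternative decomposition, same results).

-- shared module constant (the STATUS_TOKENS set literal)
def STATUS_TOKENS : PySem.Set String :=
  PySem.Set.ofList ["approved", "approve", "complete", "completed", "confirmed",
                    "draft", "pending", "rejected", "submitted"]

-- ===== PORT A =====
-- set comprehensions over the set 'tokens' are ported as filters of the deduplicated list
def evidence_markers (tokens : List String) : List (String × List String) :=
  let tks : PySem.Set String := PySem.Set.ofList tokens
  let page := tks.filter (fun t => t == "page" || PySem.Str.startswith t "page")
  let opt := tks.filter (fun t => t == "option" || PySem.Str.startswith t "option")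
  let sect := tks.filter (fun t => t == "section" || PySem.Str.startswith t "section")
  let status := PySem.Set.inter tks STATUS_TOKENS
  let numeric_pages : PySem.Set String :=
    if PySem.Set.contains tks "page" then
      tks.filter (fun t => PySem.Str.strIsdigit t || PySem.Str.isIn "/" t)
    else PySem.Set.empty
  [("page", PySem.Set.union page numeric_pages), ("option", opt),
   ("section", sect), ("status", status)]

-- ===== PORT B =====
-- loop body of B's single pass: dispatch one token into the five accumulator sets
def emStep (has_page : Bool)
    (acc : PySem.Set String × PySem.Set String × PySem.Set String × PySem.Set String × PySem.Set String)
    (t : String) :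
    PySem.Set String × PySem.Set String × PySem.Set String × PySem.Set String × PySem.Set String :=
  let (p, o, s, st, np) := acc
  let (p, o, s, st) :=
    if PySem.Str.startswith t "page" then (PySem.Set.add p t, o, s, st)
    else if PySem.Str.startswith t "option" then (p, PySem.Set.add o t, s, st)
    else if PySem.Str.startswith t "section" then (p, o, PySem.Set.add s t, st)
    else if PySem.Set.contains STATUS_TOKENS t then (p, o, s, PySem.Set.add st t)
    else (p, o, s, st)
  let np := if has_page && (PySem.Str.strIsdigit t || PySem.Str.isIn "/" t)
            then PySem.Set.add np t else np
  (p, o, s, st, np)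

def evidence_markers_alt (tokens : List String) : List (String × List String) :=
  let has_page := tokens.contains "page"
  let acc := tokens.foldl (emStep has_page)
    (PySem.Set.empty, PySem.Set.empty, PySem.Set.empty, PySem.Set.empty, PySem.Set.empty)
  let (p, o, s, st, np) := acc
  [("page", PySem.Set.union p np), ("option", o), ("section", s), ("status", st)]

-- ===== PRECONDITION & SPEC =====
def Spec_evidence_markers (tokens : List String) (out : List (String × List String)) : Prop := out = evidence_markers_alt tokens
instance (tokens : List String) (out : List (String × List String)) : Decidable (Spec_evidence_markers tokens out) := by unfold Spec_evidence_markers; infer_instance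

-- ===== CLAIM (what is proved, stated in full; the proofs are below) =====
def Claim_equal_evidence_markers : Prop := ∀ (tokens : List String), Dom_evidence_markers tokens → Spec_evidence_markers tokens (evidence_markers tokens)

-- ===== LEMMAS AND PROOFS =====

-- conditional insertion into one accumulator set
def emIf (q : String → Bool) (a : PySem.Set String) (t : String) : PySem.Set String :=
  if q t then PySem.Set.add a t else a

-- the five effective predicates of B's chain
def qPage (t : String) : Bool := PySem.Str.startswith t "page"
def qOpt (t : String) : Bool := !PySem.Str.startswith t "page" && PySem.Str.startswith t "option"
def qSect (t : String) : Bool := !PySem.Str.startswith t "page" && !PySem.Str.startswith t "option" && PySem.Str.startswith t "section"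
def qStat (t : String) : Bool := !PySem.Str.startswith t "page" && !PySem.Str.startswith t "option" && !PySem.Str.startswith t "section" && PySem.Set.contains STATUS_TOKENS t
def qNum (hp : Bool) (t : String) : Bool := hp && (PySem.Str.strIsdigit t || PySem.Str.isIn "/" t)

-- B's chain step is five independent conditional insertions
lemma emStep_eq (hp : Bool)
    (acc : PySem.Set String × PySem.Set String × PySem.Set String × PySem.Set String × PySem.Set String)
    (t : String) :
    emStep hp acc t =
      (emIf qPage acc.1 t, emIf qOpt acc.2.1 t, emIf qSect acc.2.2.1 t,
       emIf qStat acc.2.2.2.1 t, emIf (qNum hp) acc.2.2.2.2 t) := by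
  obtain ⟨p, o, s, st, np⟩ := acc
  simp only [emStep, emIf, qPage, qOpt, qSect, qStat, qNum]
  by_cases h1 : PySem.Str.startswith t "page" = true <;>
    by_cases h2 : PySem.Str.startswith t "option" = true <;>
      by_cases h3 : PySem.Str.startswith t "section" = true <;>
        by_cases h4 : PySem.Set.contains STATUS_TOKENS t = true <;>
          simp only [h1, h2, h3, h4, Bool.not_eq_true] at * <;>
          simp

-- the fold of five independent insertions splits into five folds
lemma foldl_emStep_split (hp : Bool) (l : List String)
    (p o s st np : PySem.Set String) :
    l.foldl (emStep hp) (p, o, s, st, np) =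
      (l.foldl (emIf qPage) p, l.foldl (emIf qOpt) o, l.foldl (emIf qSect) s,
       l.foldl (emIf qStat) st, l.foldl (emIf (qNum hp)) np) := by
  induction l generalizing p o s st np with
  | nil => rfl
  | cons x xs ih => simp only [List.foldl_cons, emStep_eq, ih]

-- a conditional-insertion fold from empty is set(filter(q, l))
lemma foldl_emIf_eq_ofList_filter (q : String → Bool) (l : List String) :
    l.foldl (emIf q) PySem.Set.empty = PySem.Set.ofList (l.filter q) := by
  unfold emIf
  rw [PySem.List.foldl_if_eq_foldl_filter]
  rfl

-- Set.add distributes over filtering by a predicate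
lemma filter_add (q : String → Bool) (a : List String) (x : String) :
    (PySem.Set.add a x).filter q =
      if q x then PySem.Set.add (a.filter q) x else a.filter q := by
  rw [PySem.Set.add_eq_ite]
  by_cases hm : x ∈ a
  · by_cases hq : q x = true
    · have hmf : x ∈ a.filter q := List.mem_filter.mpr ⟨hm, hq⟩
      simp [hm, hq, hmf]
    · simp [hm, hq]
  · by_cases hq : q x = true
    · have hnm : x ∉ a.filter q := fun hc => hm (List.mem_filter.mp hc).1
      simp [hm, hq, List.filter_append, hnm]
    · simp [hm, List.filter_append, hq]

-- filtering commutes with deduplication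
lemma foldl_add_filter (q : String → Bool) (l : List String) (a : List String) :
    (l.foldl PySem.Set.add a).filter q = (l.filter q).foldl PySem.Set.add (a.filter q) := by
  induction l generalizing a with
  | nil => rfl
  | cons x xs ih =>
      simp only [List.foldl_cons, List.filter_cons]
      rw [ih, filter_add]
      by_cases hq : q x = true <;> simp [hq]

lemma ofList_filter (q : String → Bool) (l : List String) :
    PySem.Set.ofList (l.filter q) = (PySem.Set.ofList l).filter q := by
  rw [PySem.Set.ofList_eq_foldl, PySem.Set.ofList_eq_foldl]
  simpa using (foldl_add_filter q l []).symm

-- mutual exclusion of the marker prefixes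
lemma sw_excl {t : String} {u v : String} (hu : PySem.Str.startswith t u = true)
    (h : ¬ (v.toList <+: u.toList) ∧ ¬ (u.toList <+: v.toList)) :
    PySem.Str.startswith t v = false := by
  by_contra hc
  rw [Bool.not_eq_false] at hc
  simp only [PySem.Str.startswith_eq, PySem.Chars.startswith_iff] at hu hc
  rcases List.prefix_or_prefix_of_prefix hc hu with h' | h'
  · exact h.1 h'
  · exact h.2 h'

lemma status_not_prefixed (t : String) (h : PySem.Set.contains STATUS_TOKENS t = true) :
    PySem.Str.startswith t "page" = false ∧ PySem.Str.startswith t "option" = false ∧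
      PySem.Str.startswith t "section" = false := by
  rw [PySem.Set.contains_iff] at h
  simp only [STATUS_TOKENS, PySem.Set.mem_ofList, List.mem_cons, List.not_mem_nil, or_false] at h
  rcases h with h | h | h | h | h | h | h | h | h <;> subst h <;>
    exact ⟨by decide, by decide, by decide⟩

-- 't == "x" || t.startswith("x")' is just the startswith test
lemma eq_or_startswith (t x : String) :
    (t == x || PySem.Str.startswith t x) = PySem.Str.startswith t x := by
  by_cases h : t = x
  · subst h
    simp [PySem.Str.startswith_eq, PySem.Chars.startswith_iff]
  · simp [h]

-- the chain predicates coincide with A's comprehension predicates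
lemma qOpt_eq (t : String) : qOpt t = (t == "option" || PySem.Str.startswith t "option") := by
  rw [eq_or_startswith]
  unfold qOpt
  by_cases h : PySem.Str.startswith t "option" = true
  · have h' : PySem.Str.startswith t "page" = false :=
      sw_excl (v := "page") h ⟨by decide, by decide⟩
    rw [h, h']
    rfl
  · rw [Bool.not_eq_true] at h
    rw [h]
    simp

lemma qSect_eq (t : String) : qSect t = (t == "section" || PySem.Str.startswith t "section") := by
  rw [eq_or_startswith]
  unfold qSect
  by_cases h : PySem.Str.startswith t "section" = true
  · have h1 : PySem.Str.startswith t "page" = false :=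
      sw_excl (v := "page") h ⟨by decide, by decide⟩
    have h2 : PySem.Str.startswith t "option" = false :=
      sw_excl (v := "option") h ⟨by decide, by decide⟩
    rw [h, h1, h2]
    rfl
  · rw [Bool.not_eq_true] at h
    rw [h]
    simp

lemma qStat_eq (t : String) : qStat t = PySem.Set.contains STATUS_TOKENS t := by
  unfold qStat
  by_cases h : PySem.Set.contains STATUS_TOKENS t = true
  · obtain ⟨h1, h2, h3⟩ := status_not_prefixed t h
    rw [h, h1, h2, h3]
    rfl
  · rw [Bool.not_eq_true] at h
    rw [h]
    simp

-- ===== VERDICT (by name: the statement is the Claim_ definition above) =====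
theorem evidence_markers_spec : Claim_equal_evidence_markers := by
  intro tokens _
  show evidence_markers tokens = evidence_markers_alt tokens
  unfold evidence_markers evidence_markers_alt
  simp only []
  rw [foldl_emStep_split]
  simp only [foldl_emIf_eq_ofList_filter]
  -- normalise B's chain predicates to A's comprehension predicates
  have e1 : qPage = fun t => (t == "page" || PySem.Str.startswith t "page") :=
    funext fun t => ((eq_or_startswith t "page").symm : qPage t = _)
  have e2 : qOpt = fun t => (t == "option" || PySem.Str.startswith t "option") := funext qOpt_eq
  have e3 : qSect = fun t => (t == "section" || PySem.Str.startswith t "section") := funext qSect_eq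
  have e4 : qStat = fun t => PySem.Set.contains STATUS_TOKENS t := funext qStat_eq
  rw [e1, e2, e3, e4]
  simp only [ofList_filter]
  -- the 'page' flag is the same whether read off the list or the set
  have hhp : tokens.contains "page" = PySem.Set.contains (PySem.Set.ofList tokens) "page" := by
    simp [PySem.Set.contains_eq_listContains, PySem.Set.mem_ofList]
  rw [hhp]
  -- the intersection is a filter in the left operand's order
  have hstatus : PySem.Set.inter (PySem.Set.ofList tokens) STATUS_TOKENS
      = (PySem.Set.ofList tokens).filter (fun t => PySem.Set.contains STATUS_TOKENS t) := rfl
  rw [hstatus]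
  by_cases hp : PySem.Set.contains (PySem.Set.ofList tokens) "page" = true
  · rw [hp]
    have e5 : qNum true = fun t => (PySem.Str.strIsdigit t || PySem.Str.isIn "/" t) :=
      funext fun t => by simp [qNum]
    rw [e5]
    simp
  · rw [Bool.not_eq_true] at hp
    rw [hp]
    have e5 : qNum false = fun _ => false := funext fun t => by simp [qNum]
    rw [e5]
    simp [List.filter_false]
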